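-- pv_equiv track=rewrite | github.com/neuviemeporte/mzretools | tools/util.py | splitComment
-- ===== SOURCE A (Python) =====
-- def splitComment(str):
--     inQuote = False
--     inComment = False
--     instr = ''
--     comment = ''
--     for c in str:
--         if inComment:
--             comment += c
--             continue
--         if c == '\'':
--             inQuote = not inQuote
--         elif c == ';' and not inQuote:
--             inComment = True
--             continue
--         instr += c
--     return instr, comment
-- ===== SOURCE B (Python) =====
-- def splitComment(str):
--     inQuote = False
--     for i, c in enumerate(str):
--         if c == ';' and not inQuote:
--             return str[:i], str[i+1:]
--         if c == '\'':
--             inQuote = not inQuote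
--     return str, ''
-- ===== Notes on version B (the rewrite author's own statement) =====
-- stated objective: simpler
-- what changed: B no longer builds the two output strings character by character: it only scans for the index of the first separator semicolon outside quotes and returns two slices of the input (or the whole string and an empty comment if none is found), where A accumulates both halves in a char-append loop.
import Mathlib
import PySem

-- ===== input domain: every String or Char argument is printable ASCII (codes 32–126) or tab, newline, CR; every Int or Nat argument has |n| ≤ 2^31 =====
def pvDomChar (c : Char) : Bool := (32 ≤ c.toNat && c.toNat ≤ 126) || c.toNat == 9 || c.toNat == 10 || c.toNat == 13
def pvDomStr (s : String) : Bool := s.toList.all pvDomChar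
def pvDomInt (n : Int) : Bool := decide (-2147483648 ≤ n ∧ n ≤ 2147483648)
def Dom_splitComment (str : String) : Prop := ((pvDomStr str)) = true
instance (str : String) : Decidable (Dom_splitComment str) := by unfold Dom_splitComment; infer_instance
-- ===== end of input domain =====

-- B replaces A's two character-append accumulators by a single scan for the index of the
-- first unquoted ';' followed by two slices; objective: simpler.

-- ===== PORT A =====
-- A's loop over the characters, carrying (inQuote, inComment); the appended characters of
-- each accumulator are returned as the cons-built remainder (same traversal, same state).
def splitCommentGoA : List Char → Bool → Bool → List Char × List Char
  | [], _, _ => ([], [])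
  | c :: cs, inQuote, inComment =>
    if inComment then
      let r := splitCommentGoA cs inQuote true
      (r.1, c :: r.2)
    else if c = '\'' then
      let r := splitCommentGoA cs (!inQuote) false
      (c :: r.1, r.2)
    else if c = ';' && !inQuote then
      splitCommentGoA cs inQuote true
    else
      let r := splitCommentGoA cs inQuote false
      (c :: r.1, r.2)

def splitComment (str : String) : String × String :=
  let r := splitCommentGoA str.toList false false
  (String.ofList r.1, String.ofList r.2)

-- ===== PORT B =====
-- Source B's enumerate loop: find the index of the first ';' outside quotes, tracking the quote flag.
def splitCommentFindB : List Char → Bool → Option Nat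
  | [], _ => none
  | c :: cs, inQuote =>
    if c = ';' && !inQuote then some 0
    else (splitCommentFindB cs (if c = '\'' then !inQuote else inQuote)).map (· + 1)

-- str[:i] and str[i+1:] with 0 ≤ i < len are exactly take i / drop (i+1).
def splitComment_alt (str : String) : String × String :=
  match splitCommentFindB str.toList false with
  | none => (str, "")
  | some i => (String.ofList (str.toList.take i), String.ofList (str.toList.drop (i + 1)))

-- ===== PRECONDITION & SPEC =====
def Spec_splitComment (str : String) (out : String × String) : Prop := out = splitComment_alt str
instance (str : String) (out : String × String) : Decidable (Spec_splitComment str out) := by unfold Spec_splitComment; infer_instance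

-- ===== CLAIM (what is proved, stated in full; the proofs are below) =====
def Claim_equal_splitComment : Prop := ∀ (str : String), Dom_splitComment str → Spec_splitComment str (splitComment str)

-- ===== LEMMAS AND PROOFS =====
theorem goA_inComment (cs : List Char) (q : Bool) :
    splitCommentGoA cs q true = ([], cs) := by
  induction cs generalizing q with
  | nil => rfl
  | cons c cs ih => simp [splitCommentGoA, ih]

theorem goA_eq_findB (cs : List Char) (q : Bool) :
    splitCommentGoA cs q false =
      match splitCommentFindB cs q with
      | none => (cs, [])
      | some i => (cs.take i, cs.drop (i + 1)) := by
  induction cs generalizing q with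
  | nil => rfl
  | cons c cs ih =>
    by_cases hsemi : c = ';' && !q
    · have hc : c = ';' ∧ q = false := by
        rcases Bool.and_eq_true_iff.mp hsemi with ⟨h1, h2⟩
        exact ⟨by simpa using h1, by simpa using h2⟩
      simp [splitCommentGoA, splitCommentFindB, hc.1, hc.2, goA_inComment]
    · by_cases hq : c = '\''
      · simp [splitCommentGoA, splitCommentFindB, hq, ih]
        cases splitCommentFindB cs (!q) <;> simp
      · simp [splitCommentGoA, splitCommentFindB, hq, hsemi, ih]
        cases splitCommentFindB cs q <;> simp

-- ===== VERDICT (by name: the statement is the Claim_ definition above) =====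
theorem splitComment_spec : Claim_equal_splitComment := by
  intro str _
  unfold Spec_splitComment splitComment splitComment_alt
  rw [goA_eq_findB]
  cases h : splitCommentFindB str.toList false <;> simp
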